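-- pv_equiv track=rewrite | github.com/RawwBear/WDI | Zestaw_2/07.py | is_multiple_exp
-- ===== SOURCE A (Python) =====
-- def is_multiple_exp(num):
--     a = 3
--     diff = 4
--     while num >= a:
--         if num % a == 0:
--             return True
--         a += diff
--         diff += 2
--     return False
-- ===== SOURCE B (Python) =====
-- def _isqrt(n):
--     # binary search for floor(sqrt(n)), n >= 0
--     lo, hi = 0, n
--     while lo < hi:
--         mid = (lo + hi + 1) // 2
--         if mid * mid <= n:
--             lo = mid
--         else:
--             hi = mid - 1
--     return lo
--
--
-- def _is_form(d):
--     # d == k*k + k + 1 for some k >= 1  <=>  4d-3 is a perfect square with odd root >= 3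
--     m = 4 * d - 3
--     r = _isqrt(m)
--     return r * r == m and r >= 3 and r % 2 == 1
--
--
-- def is_multiple_exp(num):
--     if num < 3:
--         return False
--     i = 1
--     while i * i <= num:
--         if num % i == 0 and (_is_form(i) or _is_form(num // i)):
--             return True
--         i += 1
--     return False
-- ===== Notes on version B (the rewrite author's own statement) =====
-- stated objective: alternative
-- what changed: B enumerates the actual divisors of num by trial division up to sqrt(num) and tests each divisor for the shape k²+k+1 via a binary-search integer square root (4d−3 a perfect square with odd root >= 3), instead of A's linear scan over the candidate values k²+k+1 generated by an additive recurrence.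
import Mathlib
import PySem

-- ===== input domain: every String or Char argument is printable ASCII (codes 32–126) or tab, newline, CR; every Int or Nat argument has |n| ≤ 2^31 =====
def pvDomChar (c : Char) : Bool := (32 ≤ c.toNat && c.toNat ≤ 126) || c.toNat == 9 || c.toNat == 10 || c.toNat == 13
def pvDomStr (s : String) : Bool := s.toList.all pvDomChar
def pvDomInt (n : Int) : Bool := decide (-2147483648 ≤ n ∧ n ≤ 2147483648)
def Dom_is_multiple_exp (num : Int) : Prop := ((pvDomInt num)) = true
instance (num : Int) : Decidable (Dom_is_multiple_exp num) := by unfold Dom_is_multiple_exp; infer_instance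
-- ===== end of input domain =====

-- B enumerates the divisors of num by trial division up to √num and tests each for the
-- shape k²+k+1 via a hand-written integer square root, instead of A's linear scan over
-- the successive candidates k²+k+1 kept by an additive recurrence; objective: alternative algorithm (same asymptotic cost).

-- ===== PORT A =====
-- the while loop of A; fuel is only a totality guard (proved sufficient below)
def pvLoopA (fuel : Nat) (num a diff : Int) : Bool :=
  match fuel with
  | 0 => false
  | fuel + 1 =>
    if a ≤ num then
      if PySem.Int.mod num a == 0 then true
      else pvLoopA fuel num (a + diff) (diff + 2)
    else false

def is_multiple_exp (num : Int) : Bool := pvLoopA (num.toNat + 1) num 3 4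

-- ===== PORT B =====
-- binary-search integer square root (Source B's _isqrt)
def pvIsqrtLoop (n lo hi : Int) : Int :=
  if h : lo < hi then
    let mid := PySem.Int.floordiv (lo + hi + 1) 2
    if mid * mid ≤ n then pvIsqrtLoop n mid hi
    else pvIsqrtLoop n lo (mid - 1)
  else lo
termination_by (hi - lo).toNat
decreasing_by
  · have e : lo + hi + 1 = (lo + 1) + hi := by ring
    have hb := PySem.Int.floordiv_two_mid_bounds (lo := lo + 1) (hi := hi) (by omega)
    rw [e]
    omega
  · have e : lo + hi + 1 = (lo + 1) + hi := by ring
    have hb := PySem.Int.floordiv_two_mid_bounds (lo := lo + 1) (hi := hi) (by omega)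
    rw [e] at *
    omega

def pvIsqrt (n : Int) : Int := pvIsqrtLoop n 0 n

-- Source B's _is_form
def pvIsForm (d : Int) : Bool :=
  let m := 4 * d - 3
  let r := pvIsqrt m
  r * r == m && decide (3 ≤ r) && PySem.Int.mod r 2 == 1

-- Source B's main while loop; fuel is only a totality guard
def pvLoopB (fuel : Nat) (num i : Int) : Bool :=
  match fuel with
  | 0 => false
  | fuel + 1 =>
    if i * i ≤ num then
      if PySem.Int.mod num i == 0 && (pvIsForm i || pvIsForm (PySem.Int.floordiv num i)) then
        true
      else pvLoopB fuel num (i + 1)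
    else false

def is_multiple_exp_alt (num : Int) : Bool :=
  if num < 3 then false else pvLoopB (num.toNat + 1) num 1

-- ===== PRECONDITION & SPEC =====
def Spec_is_multiple_exp (num : Int) (out : Bool) : Prop := out = is_multiple_exp_alt num
instance (num : Int) (out : Bool) : Decidable (Spec_is_multiple_exp num out) := by unfold Spec_is_multiple_exp; infer_instance

-- ===== CLAIM (what is proved, stated in full; the proofs are below) =====
def Claim_equal_is_multiple_exp : Prop := ∀ (num : Int), Dom_is_multiple_exp num → Spec_is_multiple_exp num (is_multiple_exp num)

-- ===== LEMMAS AND PROOFS =====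

lemma pvMidBounds {lo hi : Int} (h : lo < hi) :
    lo + 1 ≤ PySem.Int.floordiv (lo + hi + 1) 2 ∧ PySem.Int.floordiv (lo + hi + 1) 2 ≤ hi := by
  have e : lo + hi + 1 = (lo + 1) + hi := by ring
  rw [e]
  exact PySem.Int.floordiv_two_mid_bounds (by omega)

lemma pvIsqrtLoop_spec (n lo hi : Int) (h0 : 0 ≤ lo) (hlh : lo ≤ hi)
    (hl : lo * lo ≤ n) (hh : n < (hi + 1) * (hi + 1)) :
    0 ≤ pvIsqrtLoop n lo hi ∧ pvIsqrtLoop n lo hi * pvIsqrtLoop n lo hi ≤ n ∧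
      n < (pvIsqrtLoop n lo hi + 1) * (pvIsqrtLoop n lo hi + 1) := by
  induction lo, hi using pvIsqrtLoop.induct (n := n) with
  | case1 lo hi h mid hm ih =>
    have hb : lo + 1 ≤ mid ∧ mid ≤ hi := pvMidBounds h
    rw [pvIsqrtLoop]
    simp only [dif_pos h]; rw [if_pos hm]
    exact ih (by omega) (by omega) hm hh
  | case2 lo hi h mid hm ih =>
    have hb : lo + 1 ≤ mid ∧ mid ≤ hi := pvMidBounds h
    rw [pvIsqrtLoop]
    simp only [dif_pos h]; rw [if_neg hm]
    have hh' : n < (mid - 1 + 1) * (mid - 1 + 1) := by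
      have e : mid - 1 + 1 = mid := by ring
      rw [e]; omega
    exact ih h0 (by omega) hl hh'
  | case3 lo hi h =>
    rw [pvIsqrtLoop]
    simp only [dif_neg h]
    have : lo = hi := by omega
    subst this
    exact ⟨h0, hl, hh⟩

lemma pv_sq_mono {i j : Int} (h0 : 0 ≤ i) (h : i ≤ j) : i * i ≤ j * j := by nlinarith

lemma pvIsqrt_spec (n : Int) (hn : 0 ≤ n) :
    0 ≤ pvIsqrt n ∧ pvIsqrt n * pvIsqrt n ≤ n ∧ n < (pvIsqrt n + 1) * (pvIsqrt n + 1) := by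
  have h1 : (0 : Int) * 0 ≤ n := by omega
  have h2 : n < (n + 1) * (n + 1) := by nlinarith
  exact pvIsqrtLoop_spec n 0 n le_rfl hn h1 h2

lemma pvIsqrt_unique (n s : Int) (hn : 0 ≤ n) (hs : 0 ≤ s) (h : s * s = n) :
    pvIsqrt n = s := by
  obtain ⟨h0, hl, hh⟩ := pvIsqrt_spec n hn
  by_contra hne
  rcases lt_or_gt_of_ne hne with hlt | hgt
  · have : (pvIsqrt n + 1) * (pvIsqrt n + 1) ≤ s * s := by nlinarith
    omega
  · have : s * s < pvIsqrt n * pvIsqrt n := by nlinarith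
    omega

lemma pvIsForm_iff (d : Int) (hd : 1 ≤ d) :
    pvIsForm d = true ↔ ∃ k : Int, 1 ≤ k ∧ d = k * k + k + 1 := by
  have hm : (0 : Int) ≤ 4 * d - 3 := by omega
  constructor
  · intro h
    unfold pvIsForm at h
    simp only [Bool.and_eq_true, beq_iff_eq, decide_eq_true_eq] at h
    obtain ⟨⟨hsq, hr3⟩, hodd⟩ := h
    set r := pvIsqrt (4 * d - 3) with hrdef
    have hmod : PySem.Int.mod r 2 = r % 2 := PySem.Int.mod_eq_emod_of_pos (by omega)
    rw [hmod] at hodd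
    obtain ⟨k, hk⟩ : ∃ k : Int, r = 2 * k + 1 := ⟨(r - 1) / 2, by omega⟩
    refine ⟨k, by omega, ?_⟩
    have : (2 * k + 1) * (2 * k + 1) = 4 * d - 3 := by rw [← hk]; exact hsq
    nlinarith
  · rintro ⟨k, hk, rfl⟩
    have hr : pvIsqrt (4 * (k * k + k + 1) - 3) = 2 * k + 1 :=
      pvIsqrt_unique _ _ (by nlinarith) (by omega) (by ring)
    unfold pvIsForm
    simp only [hr, Bool.and_eq_true, beq_iff_eq, decide_eq_true_eq]
    refine ⟨⟨by ring, by omega⟩, ?_⟩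
    have hmod : PySem.Int.mod (2 * k + 1) 2 = (2 * k + 1) % 2 := PySem.Int.mod_eq_emod_of_pos (by omega)
    rw [hmod]
    omega

lemma pv_f_mono {k j : Int} (hk : 1 ≤ k) (h : k ≤ j) :
    k * k + k + 1 ≤ j * j + j + 1 := by nlinarith

lemma pvLoopA_iff (fuel : Nat) : ∀ (num k : Int), 1 ≤ k →
    (num + 1 - (k * k + k + 1)).toNat < fuel →
    (pvLoopA fuel num (k * k + k + 1) (2 * k + 2) = true ↔
      ∃ j : Int, k ≤ j ∧ j * j + j + 1 ≤ num ∧ (j * j + j + 1) ∣ num) := by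
  induction fuel with
  | zero => intro num k _ hf; omega
  | succ f ih =>
    intro num k hk hf
    rw [pvLoopA]
    by_cases ha : k * k + k + 1 ≤ num
    · rw [if_pos ha]
      by_cases hdvd : (k * k + k + 1) ∣ num
      · have : PySem.Int.mod num (k * k + k + 1) = 0 :=
          (PySem.Int.mod_eq_zero_iff_dvd num (k * k + k + 1)).mpr hdvd
        rw [this]
        simp only [beq_self_eq_true, if_pos]
        constructor
        · intro _; exact ⟨k, le_rfl, ha, hdvd⟩
        · intro _; trivial
      · have hm : ¬ (PySem.Int.mod num (k * k + k + 1) == 0) = true := by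
          simp only [beq_iff_eq]
          intro hc
          exact hdvd ((PySem.Int.mod_eq_zero_iff_dvd num (k * k + k + 1)).mp hc)
        rw [if_neg (by simpa using hm)]
        have e1 : k * k + k + 1 + (2 * k + 2) = (k + 1) * (k + 1) + (k + 1) + 1 := by ring
        have e2 : 2 * k + 2 + 2 = 2 * (k + 1) + 2 := by ring
        rw [e1, e2]
        have hstep : (k + 1) * (k + 1) + (k + 1) + 1 = (k * k + k + 1) + (2 * k + 2) := by ring
        have hf' : (num + 1 - ((k + 1) * (k + 1) + (k + 1) + 1)).toNat < f := by
          rw [hstep]; omega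
        rw [ih num (k + 1) (by omega) hf']
        constructor
        · rintro ⟨j, hj, hle, hd⟩; exact ⟨j, by omega, hle, hd⟩
        · rintro ⟨j, hj, hle, hd⟩
          refine ⟨j, ?_, hle, hd⟩
          rcases eq_or_lt_of_le hj with heq | hlt
          · exact absurd (heq ▸ hd) hdvd
          · omega
    · rw [if_neg ha]
      simp only [Bool.false_eq_true, false_iff, not_exists]
      rintro j ⟨hj, hle, -⟩
      exact ha (le_trans (pv_f_mono hk hj) hle)

lemma pvA_iff (num : Int) : is_multiple_exp num = true ↔
    ∃ j : Int, 1 ≤ j ∧ j * j + j + 1 ≤ num ∧ (j * j + j + 1) ∣ num := by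
  unfold is_multiple_exp
  have e1 : (3 : Int) = 1 * 1 + 1 + 1 := by norm_num
  have e2 : (4 : Int) = 2 * 1 + 2 := by norm_num
  rw [e1, e2, pvLoopA_iff (num.toNat + 1) num 1 le_rfl (by omega)]

lemma pvLoopB_iff (fuel : Nat) : ∀ (num i : Int), 1 ≤ i →
    (num + 1 - i).toNat < fuel →
    (pvLoopB fuel num i = true ↔
      ∃ j : Int, i ≤ j ∧ j * j ≤ num ∧ j ∣ num ∧
        (pvIsForm j = true ∨ pvIsForm (PySem.Int.floordiv num j) = true)) := by
  induction fuel with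
  | zero => intro num i _ hf; omega
  | succ f ih =>
    intro num i hi hf
    rw [pvLoopB]
    by_cases hsq : i * i ≤ num
    · rw [if_pos hsq]
      have hile : i ≤ num := le_trans (by nlinarith) hsq
      by_cases hcond : i ∣ num ∧ (pvIsForm i = true ∨ pvIsForm (PySem.Int.floordiv num i) = true)
      · have : (PySem.Int.mod num i == 0 && (pvIsForm i || pvIsForm (PySem.Int.floordiv num i))) = true := by
          simp only [Bool.and_eq_true, beq_iff_eq, Bool.or_eq_true]
          exact ⟨(PySem.Int.mod_eq_zero_iff_dvd num i).mpr hcond.1, hcond.2⟩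
        rw [if_pos this]
        simp only [true_iff]
        exact ⟨i, le_rfl, hsq, hcond.1, hcond.2⟩
      · have : ¬ (PySem.Int.mod num i == 0 && (pvIsForm i || pvIsForm (PySem.Int.floordiv num i))) = true := by
          simp only [Bool.and_eq_true, beq_iff_eq, Bool.or_eq_true]
          rintro ⟨hmod, hform⟩
          exact hcond ⟨(PySem.Int.mod_eq_zero_iff_dvd num i).mp hmod, hform⟩
        rw [if_neg this]
        rw [ih num (i + 1) (by omega) (by omega)]
        constructor
        · rintro ⟨j, hj, h1, h2, h3⟩; exact ⟨j, by omega, h1, h2, h3⟩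
        · rintro ⟨j, hj, h1, h2, h3⟩
          refine ⟨j, ?_, h1, h2, h3⟩
          rcases eq_or_lt_of_le hj with heq | hlt
          · exact absurd ⟨heq ▸ h2, heq ▸ h3⟩ hcond
          · omega
    · rw [if_neg hsq]
      simp only [Bool.false_eq_true, false_iff, not_exists]
      rintro j ⟨hj, hle, -⟩
      exact hsq (le_trans (pv_sq_mono (by omega) hj) hle)

lemma pvB_iff (num : Int) (h3 : 3 ≤ num) : is_multiple_exp_alt num = true ↔
    ∃ j : Int, 1 ≤ j ∧ j * j ≤ num ∧ j ∣ num ∧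
      (pvIsForm j = true ∨ pvIsForm (PySem.Int.floordiv num j) = true) := by
  unfold is_multiple_exp_alt
  rw [if_neg (by omega)]
  exact pvLoopB_iff (num.toNat + 1) num 1 le_rfl (by omega)

lemma pv_main (num : Int) : is_multiple_exp num = is_multiple_exp_alt num := by
  by_cases h3 : 3 ≤ num
  · have hpos : (0 : Int) < num := by omega
    have hAB : is_multiple_exp num = true ↔ is_multiple_exp_alt num = true := by
      rw [pvA_iff, pvB_iff num h3]
      constructor
      · rintro ⟨j, hj, hle, hdvd⟩
        set d := j * j + j + 1 with hd
        have hd3 : 3 ≤ d := by nlinarith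
        have hform : pvIsForm d = true := (pvIsForm_iff d (by omega)).mpr ⟨j, hj, rfl⟩
        by_cases hdd : d * d ≤ num
        · exact ⟨d, by omega, hdd, hdvd, Or.inl hform⟩
        · -- complementary divisor q = num / d
          obtain ⟨q, hq⟩ := hdvd
          have hdpos : (0 : Int) < d := by omega
          have hqpos : (0 : Int) < q := by nlinarith
          have hqlt : q < d := by nlinarith
          have hqq : q * q ≤ num := by nlinarith
          have hfl : PySem.Int.floordiv num q = d := by
            rw [PySem.Int.floordiv_eq_ediv_of_pos hqpos, hq, Int.mul_ediv_cancel d (show q ≠ 0 by omega)]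
          exact ⟨q, by omega, hqq, Dvd.intro d (by rw [hq, mul_comm]), Or.inr (hfl ▸ hform)⟩
      · rintro ⟨j, hj, hsq, hdvd, hform | hform⟩
        · obtain ⟨k, hk, hkj⟩ := (pvIsForm_iff j (by omega)).mp hform
          exact ⟨k, hk, hkj ▸ Int.le_of_dvd hpos hdvd, hkj ▸ hdvd⟩
        · have hjpos : (0 : Int) < j := by omega
          set d := PySem.Int.floordiv num j with hddef
          have hfl : d = num / j := PySem.Int.floordiv_eq_ediv_of_pos hjpos
          have hnum : d * j = num := by rw [hfl]; exact Int.ediv_mul_cancel hdvd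
          have hd1 : 1 ≤ d := by nlinarith
          obtain ⟨k, hk, hkd⟩ := (pvIsForm_iff d hd1).mp hform
          have hddvd : d ∣ num := Dvd.intro j (by rw [← hnum, mul_comm])
          exact ⟨k, hk, hkd ▸ Int.le_of_dvd hpos hddvd, hkd ▸ hddvd⟩
    cases hA : is_multiple_exp num <;> cases hB : is_multiple_exp_alt num <;> simp_all
  · -- num < 3: both sides are false
    have hB : is_multiple_exp_alt num = false := by
      unfold is_multiple_exp_alt; rw [if_pos (by omega)]
    have hA : is_multiple_exp num = false := by
      cases hA : is_multiple_exp num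
      · rfl
      · obtain ⟨j, hj, hle, -⟩ := (pvA_iff num).mp hA
        have := pv_f_mono (k := 1) le_rfl hj
        omega
    rw [hA, hB]

-- ===== VERDICT (by name: the statement is the Claim_ definition above) =====
theorem is_multiple_exp_spec : Claim_equal_is_multiple_exp := by
  intro num _
  unfold Spec_is_multiple_exp
  exact pv_main num
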